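-- pv_equiv track=rewrite | github.com/InfiniteLoop360/GFG_POTD | Number of BST From Array.py | countBSTs
-- ===== SOURCE A (Python) =====
-- def countBSTs(arr):
--     def catalan_numbers(n):
--         C = [0] * (n + 1)
--         C[0] = 1
--         for i in range(1, n + 1):
--             for j in range(i):
--                 C[i] += C[j] * C[i - 1 - j]
--         return C
--
--     n = len(arr)
--     C = catalan_numbers(n)
--     sorted_arr = sorted(arr)
--     res = []
--
--     for x in arr:
--         L = sum(1 for val in sorted_arr if val < x)
--         R = sum(1 for val in sorted_arr if val > x)
--         res.append(C[L] * C[R])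
--
--     return res
-- ===== SOURCE B (Python) =====
-- def countBSTs(arr):
--     n = len(arr)
--     # Catalan numbers via the multiplicative recurrence C(i) = C(i-1)*(4i-2)/(i+1)
--     C = [1]
--     for i in range(1, n + 1):
--         C.append(C[-1] * (4 * i - 2) // (i + 1))
--     s = sorted(arr)
--
--     def below(x):  # number of elements strictly less than x (leftmost insertion point)
--         lo, hi = 0, n
--         while lo < hi:
--             mid = (lo + hi) // 2
--             if s[mid] < x:
--                 lo = mid + 1
--             else:
--                 hi = mid
--         return lo
--
--     def above(x):  # number of elements strictly greater than x
--         lo, hi = 0, n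
--         while lo < hi:
--             mid = (lo + hi) // 2
--             if s[mid] <= x:
--                 lo = mid + 1
--             else:
--                 hi = mid
--         return n - lo
--
--     return [C[below(x)] * C[above(x)] for x in arr]
-- ===== Notes on version B (the rewrite author's own statement) =====
-- stated objective: faster
-- what changed: Replaces the O(n^2) Catalan convolution table with the multiplicative recurrence C(i)=C(i-1)*(4i-2)//(i+1) and replaces each element's two linear scans with binary searches on the sorted array.
import Mathlib
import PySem

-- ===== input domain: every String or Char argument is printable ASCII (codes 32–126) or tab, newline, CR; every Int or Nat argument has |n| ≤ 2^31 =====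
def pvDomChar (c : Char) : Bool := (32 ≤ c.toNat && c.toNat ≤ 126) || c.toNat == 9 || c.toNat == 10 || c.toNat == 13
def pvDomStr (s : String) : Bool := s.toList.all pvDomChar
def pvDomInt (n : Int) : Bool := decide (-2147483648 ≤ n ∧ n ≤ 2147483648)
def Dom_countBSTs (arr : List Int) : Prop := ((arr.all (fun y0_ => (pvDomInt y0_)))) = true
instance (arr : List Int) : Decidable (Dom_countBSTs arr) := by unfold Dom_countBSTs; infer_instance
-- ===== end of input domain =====

-- B replaces A's O(n^2) Catalan convolution table by the multiplicative recurrence and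
-- A's per-element linear counting scans by binary searches on the sorted array.

-- ===== PORT A =====
def countBSTs (arr : List Int) : List Int :=
  let n : Nat := arr.length
  -- catalan_numbers(n): C = [0]*(n+1); C[0] = 1; nested convolution loops
  let C : List Int :=
    (PySem.List.pyRange 1 ((n : Int) + 1) 1).foldl (fun C i =>
      (PySem.List.pyRange 0 i 1).foldl (fun C j =>
        PySem.List.pySetD C i (PySem.List.pyGetD C i 0
          + PySem.List.pyGetD C j 0 * PySem.List.pyGetD C (i - 1 - j) 0)) C)
      (PySem.List.pySetD (List.replicate (n + 1) (0 : Int)) 0 1)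
  let sortedArr := PySem.List.sorted arr id
  arr.foldl (fun res x =>
    let L := sortedArr.foldl (fun acc v => if v < x then acc + 1 else acc) (0 : Int)
    let R := sortedArr.foldl (fun acc v => if v > x then acc + 1 else acc) (0 : Int)
    res ++ [PySem.List.pyGetD C L 0 * PySem.List.pyGetD C R 0]) []

-- ===== PORT B =====
-- while-loop of Source B's `below` (leftmost insertion point); fuel only makes the loop total,
-- it is hi - lo at the call site, enough for every iteration
def blLoop (s : List Int) (x : Int) : Nat → Int → Int → Int
  | 0, lo, _ => lo
  | fuel + 1, lo, hi =>
    if lo < hi then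
      let mid := PySem.Int.floordiv (lo + hi) 2
      if PySem.List.pyGetD s mid 0 < x then blLoop s x fuel (mid + 1) hi
      else blLoop s x fuel lo mid
    else lo

-- while-loop of Source B's `above`
def brLoop (s : List Int) (x : Int) : Nat → Int → Int → Int
  | 0, lo, _ => lo
  | fuel + 1, lo, hi =>
    if lo < hi then
      let mid := PySem.Int.floordiv (lo + hi) 2
      if PySem.List.pyGetD s mid 0 ≤ x then brLoop s x fuel (mid + 1) hi
      else brLoop s x fuel lo mid
    else lo

def countBSTs_alt (arr : List Int) : List Int :=
  let n : Nat := arr.length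
  let C : List Int :=
    (PySem.List.pyRange 1 ((n : Int) + 1) 1).foldl (fun C i =>
      C ++ [PySem.Int.floordiv (PySem.List.pyGetD C (-1) 0 * (4 * i - 2)) (i + 1)]) [(1 : Int)]
  let s := PySem.List.sorted arr id
  arr.map (fun x =>
    PySem.List.pyGetD C (blLoop s x n 0 (n : Int)) 0 *
    PySem.List.pyGetD C ((n : Int) - brLoop s x n 0 (n : Int)) 0)

-- ===== PRECONDITION & SPEC =====
def Spec_countBSTs (arr : List Int) (out : List Int) : Prop := out = countBSTs_alt arr
instance (arr : List Int) (out : List Int) : Decidable (Spec_countBSTs arr out) := by unfold Spec_countBSTs; infer_instance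

-- ===== CLAIM (what is proved, stated in full; the proofs are below) =====
def Claim_equal_countBSTs : Prop := ∀ (arr : List Int), Dom_countBSTs arr → Spec_countBSTs arr (countBSTs arr)

-- ===== LEMMAS AND PROOFS =====

-- ===== LEMMAS AND PROOFS =====

/-- The Catalan numbers as integers (both tables compute exactly these). -/
def catI (k : Nat) : Int := (catalan k : Int)

-- multiplicative recurrence, Nat form
theorem cat_step (m : Nat) : catalan m * (4 * m + 2) = (m + 2) * catalan (m + 1) := by
  have h1 := succ_mul_catalan_eq_centralBinom (m + 1)
  have h2 := Nat.succ_mul_centralBinom_succ m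
  have h3 := succ_mul_catalan_eq_centralBinom m
  refine Nat.eq_of_mul_eq_mul_left (Nat.succ_pos m) ?_
  calc (m + 1) * (catalan m * (4 * m + 2))
      = (4 * m + 2) * ((m + 1) * catalan m) := by ring
    _ = (4 * m + 2) * m.centralBinom := by rw [h3]
    _ = 2 * (2 * m + 1) * m.centralBinom := by ring
    _ = (m + 1) * (m + 1).centralBinom := by rw [h2]
    _ = (m + 1) * ((m + 2) * catalan (m + 1)) := by rw [← h1]

theorem cat_step_int (m : Nat) : catI m * (4 * (m : Int) + 2) = ((m : Int) + 2) * catI (m + 1) := by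
  have := cat_step m
  unfold catI
  zify at this
  linarith [this]

-- B's table equals the Catalan numbers
theorem tableB (n : Nat) :
    (PySem.List.pyRange 1 ((n : Int) + 1)).foldl
      (fun C i => C ++ [PySem.Int.floordiv (PySem.List.pyGetD C (-1) 0 * (4 * i - 2)) (i + 1)])
      [(1 : Int)]
    = (List.range (n + 1)).map catI := by
  induction n with
  | zero =>
    simp [catI, catalan_zero]
  | succ n ih =>
    have hcast : (((n + 1 : Nat) : Int) + 1) = ((n : Int) + 1) + 1 := by push_cast; ring
    rw [hcast, PySem.List.pyRange_one_succ_right (by omega), List.foldl_append, ih]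
    simp only [List.foldl_cons, List.foldl_nil]
    have hlast : (List.range (n + 1)).map catI = (List.range n).map catI ++ [catI n] := by
      rw [List.range_succ, List.map_append]; rfl
    rw [hlast, PySem.List.pyGetD_neg_one_append_singleton]
    have hdiv : PySem.Int.floordiv (catI n * (4 * ((n : Int) + 1) - 2)) (((n : Int) + 1) + 1)
        = catI (n + 1) := by
      have harg : catI n * (4 * ((n : Int) + 1) - 2) = ((n : Int) + 2) * catI (n + 1) := by
        have := cat_step_int n; linarith [this]
      rw [harg, PySem.Int.floordiv_eq_ediv_of_pos (by positivity)]
      exact Int.mul_ediv_cancel_left _ (by omega)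
    rw [hdiv, List.range_succ (n := n + 1), List.map_append, ← hlast]
    rfl

-- index/assignment helpers for A's in-place table updates
theorem pyGetD_mid {α : Type} (P Z : List α) (a d : α) :
    PySem.List.pyGetD (P ++ a :: Z) (P.length : Int) d = a := by
  simp [PySem.List.pyGetD, PySem.List.pyGet?, PySem.List.pyIdx?]

theorem pySetD_mid {α : Type} (P Z : List α) (a v : α) :
    PySem.List.pySetD (P ++ a :: Z) (P.length : Int) v = P ++ v :: Z := by
  simp [PySem.List.pySetD, PySem.List.pySet?, PySem.List.pyIdx?, List.set_append]

theorem pyGetD_left {α : Type} (P R : List α) (k : Nat) (d : α) (h : k < P.length) :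
    PySem.List.pyGetD (P ++ R) (k : Int) d = P.getD k d := by
  rw [PySem.List.pyGetD_natCast]
  simp [List.getD, List.getElem?_append_left h]


-- A's inner convolution loop on the state  (catalans so far) ++ accumulator :: (untouched zeros)
theorem innerA (i : Nat) (k : Nat) (hk : k ≤ i) : ∀ (Z : List Int) (acc : Int),
    (PySem.List.pyRange 0 (k : Int)).foldl
      (fun C j => PySem.List.pySetD C (i : Int)
        (PySem.List.pyGetD C (i : Int) 0
          + PySem.List.pyGetD C j 0 * PySem.List.pyGetD C ((i : Int) - 1 - j) 0))
      ((List.range i).map catI ++ acc :: Z)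
    = (List.range i).map catI ++ (acc + ∑ j ∈ Finset.range k, catI j * catI (i - 1 - j)) :: Z := by
  induction k with
  | zero => intro Z acc; simp
  | succ k ih =>
    intro Z acc
    have hcast : ((k + 1 : Nat) : Int) = (k : Int) + 1 := by push_cast; ring
    rw [hcast, PySem.List.pyRange_one_succ_right (by positivity), List.foldl_append,
      ih (by omega)]
    simp only [List.foldl_cons, List.foldl_nil]
    have hPlen : ((List.range i).map catI).length = i := by simp
    set P := (List.range i).map catI with hP
    set a : Int := acc + ∑ j ∈ Finset.range k, catI j * catI (i - 1 - j) with ha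
    have hgi : PySem.List.pyGetD (P ++ a :: Z) (i : Int) 0 = a := by
      rw [← hPlen]; exact pyGetD_mid P Z a 0
    have hgk : PySem.List.pyGetD (P ++ a :: Z) (k : Int) 0 = catI k := by
      rw [pyGetD_left P _ k 0 (by omega)]
      exact PySem.List.getD_map_range catI i k 0 (by omega)
    have hsub : (i : Int) - 1 - (k : Int) = ((i - 1 - k : Nat) : Int) := by omega
    have hgik : PySem.List.pyGetD (P ++ a :: Z) ((i : Int) - 1 - (k : Int)) 0
        = catI (i - 1 - k) := by
      rw [hsub, pyGetD_left P _ _ 0 (by omega)]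
      exact PySem.List.getD_map_range catI i _ 0 (by omega)
    rw [hgi, hgk, hgik]
    have hset : PySem.List.pySetD (P ++ a :: Z) (i : Int)
        (a + catI k * catI (i - 1 - k)) = P ++ (a + catI k * catI (i - 1 - k)) :: Z := by
      rw [← hPlen]; exact pySetD_mid P Z a _
    rw [hset, ha, Finset.sum_range_succ, add_assoc]

-- the convolution sum is the Catalan recurrence
theorem cat_conv (m : Nat) :
    (0 : Int) + ∑ j ∈ Finset.range (m + 1), catI j * catI (m + 1 - 1 - j) = catI (m + 1) := by
  have h := catalan_succ m
  rw [Fin.sum_univ_eq_sum_range (fun i => catalan i * catalan (m - i)) (m + 1)] at h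
  unfold catI
  rw [zero_add]
  push_cast [h]
  exact Finset.sum_congr rfl (fun j _ => by norm_num)

theorem pySetD_zero_cons {α : Type} (t : List α) (b v : α) :
    PySem.List.pySetD (b :: t) 0 v = v :: t := by
  simp [PySem.List.pySetD, PySem.List.pySet?, PySem.List.pyIdx?]

-- A's outer loop up to m fills the first m+1 catalan numbers
theorem outerA (n : Nat) (m : Nat) (hm : m ≤ n) :
    (PySem.List.pyRange 1 ((m : Int) + 1)).foldl
      (fun C i =>
        (PySem.List.pyRange 0 i).foldl (fun C j =>
          PySem.List.pySetD C i (PySem.List.pyGetD C i 0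
            + PySem.List.pyGetD C j 0 * PySem.List.pyGetD C (i - 1 - j) 0)) C)
      (PySem.List.pySetD (List.replicate (n + 1) (0 : Int)) 0 1)
    = (List.range (m + 1)).map catI ++ List.replicate (n - m) 0 := by
  induction m with
  | zero =>
    simp only [List.replicate_succ, pySetD_zero_cons]
    simp [catI, catalan_zero]
  | succ m ih =>
    have hcast : (((m + 1 : Nat) : Int) + 1) = ((m : Int) + 1) + 1 := by push_cast; ring
    rw [hcast, PySem.List.pyRange_one_succ_right (by omega), List.foldl_append, ih (by omega)]
    simp only [List.foldl_cons, List.foldl_nil]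
    have hrep : List.replicate (n - m) (0 : Int) = (0 : Int) :: List.replicate (n - (m + 1)) 0 := by
      rw [← List.replicate_succ]; congr 1; omega
    rw [hrep]
    have hcast2 : (m : Int) + 1 = ((m + 1 : Nat) : Int) := by push_cast; ring
    rw [hcast2, innerA (m + 1) (m + 1) le_rfl, cat_conv m]
    rw [show List.range (m+1+1) = List.range (m+1) ++ [m+1] from List.range_succ, List.map_append]
    simp

-- A's full table is the Catalan numbers
theorem tableA (n : Nat) :
    (PySem.List.pyRange 1 ((n : Int) + 1)).foldl
      (fun C i =>
        (PySem.List.pyRange 0 i).foldl (fun C j =>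
          PySem.List.pySetD C i (PySem.List.pyGetD C i 0
            + PySem.List.pyGetD C j 0 * PySem.List.pyGetD C (i - 1 - j) 0)) C)
      (PySem.List.pySetD (List.replicate (n + 1) (0 : Int)) 0 1)
    = (List.range (n + 1)).map catI := by
  have h := outerA n n le_rfl
  simpa using h

-- in a sorted list, position i holds an element < x iff i is below the count of elements < x
theorem count_lt_iff (s : List Int) (hs : List.Pairwise (· ≤ ·) s) (x : Int)
    (i : Nat) (hi : i < s.length) :
    s[i] < x ↔ i < s.countP (fun v => decide (v < x)) := by
  induction s generalizing i with
  | nil => simp at hi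
  | cons b t ih =>
    have hb : ∀ v ∈ t, b ≤ v := (List.pairwise_cons.mp hs).1
    have ht : t.Pairwise (· ≤ ·) := (List.pairwise_cons.mp hs).2
    cases i with
    | zero =>
      simp only [List.getElem_cons_zero, List.countP_cons]
      by_cases hbx : b < x
      · simp [hbx]
      · have h0 : t.countP (fun v => decide (v < x)) = 0 :=
          List.countP_eq_zero.mpr (fun v hv => by
            simpa using not_lt.mpr (le_trans (not_lt.mp hbx) (hb v hv)))
        simp [hbx, h0]
    | succ i =>
      have hi' : i < t.length := by simpa using hi
      simp only [List.getElem_cons_succ, List.countP_cons]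
      by_cases hbx : b < x
      · rw [ih ht i hi']
        simp [hbx]
      · have h1 : ¬ t[i] < x :=
          not_lt.mpr (le_trans (not_lt.mp hbx) (hb _ (List.getElem_mem hi')))
        have h0 : t.countP (fun v => decide (v < x)) = 0 :=
          List.countP_eq_zero.mpr (fun v hv => by
            simpa using not_lt.mpr (le_trans (not_lt.mp hbx) (hb v hv)))
        simp [hbx, h0, h1]

-- in a sorted list, position i holds an element ≤ x iff i is below length minus the count of elements > x
theorem count_le_iff (s : List Int) (hs : List.Pairwise (· ≤ ·) s) (x : Int)
    (i : Nat) (hi : i < s.length) :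
    s[i] ≤ x ↔ i < s.length - s.countP (fun v => decide (x < v)) := by
  induction s generalizing i with
  | nil => simp at hi
  | cons b t ih =>
    have hb : ∀ v ∈ t, b ≤ v := (List.pairwise_cons.mp hs).1
    have ht : t.Pairwise (· ≤ ·) := (List.pairwise_cons.mp hs).2
    have hle : t.countP (fun v => decide (x < v)) ≤ t.length := List.countP_le_length
    cases i with
    | zero =>
      simp only [List.getElem_cons_zero, List.countP_cons, List.length_cons]
      by_cases hxb : x < b
      · have hfull : t.countP (fun v => decide (x < v)) = t.length :=
          List.countP_eq_length.mpr (fun v hv => by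
            simpa using lt_of_lt_of_le hxb (hb v hv))
        simp [hxb, hfull, not_le.mpr hxb]
      · simp [hxb, not_lt.mp hxb]
        omega
    | succ i =>
      have hi' : i < t.length := by simpa using hi
      simp only [List.getElem_cons_succ, List.countP_cons, List.length_cons]
      by_cases hxb : x < b
      · have hfull : t.countP (fun v => decide (x < v)) = t.length :=
          List.countP_eq_length.mpr (fun v hv => by
            simpa using lt_of_lt_of_le hxb (hb v hv))
        have h1 : ¬ t[i] ≤ x := not_le.mpr (lt_of_lt_of_le hxb (hb _ (List.getElem_mem hi')))
        simp [hxb, hfull, h1]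
      · rw [ih ht i hi']
        simp only [hxb]
        simp
        omega

-- the `below` loop computes the count of elements < x
theorem blLoop_eq (s : List Int) (hs : List.Pairwise (· ≤ ·) s) (x : Int) :
    ∀ (fuel : Nat) (lo hi : Int), 0 ≤ lo →
      lo ≤ (s.countP (fun v => decide (v < x)) : Int) →
      (s.countP (fun v => decide (v < x)) : Int) ≤ hi → hi ≤ (s.length : Int) →
      hi - lo ≤ (fuel : Int) →
      blLoop s x fuel lo hi = (s.countP (fun v => decide (v < x)) : Int) := by
  intro fuel
  induction fuel with
  | zero => intro lo hi h0 h1 h2 h3 h4; simp only [blLoop]; omega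
  | succ fuel ih =>
    intro lo hi h0 h1 h2 h3 h4
    simp only [blLoop]
    have hmid := PySem.Int.floordiv_two_mid_bounds (lo := lo) (hi := hi)
    have hmlt := PySem.Int.floordiv_lt_iff_lt_mul (a := lo + hi) (b := 2) (q := hi) (by norm_num)
    set mid := PySem.Int.floordiv (lo + hi) 2 with hm
    split_ifs with hlh hlt
    · have hbl : lo ≤ mid ∧ mid ≤ hi := hmid (le_of_lt hlh)
      have hbh : mid < hi := hmlt.mpr (by omega)
      have hms : mid < (s.length : Int) := by omega
      have hmn : mid.toNat < s.length := by omega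
      rw [PySem.List.pyGetD_eq_getElem s 0 (by omega) hms] at hlt
      have hc : (mid : Int) < (s.countP (fun v => decide (v < x)) : Int) := by
        have := (count_lt_iff s hs x mid.toNat hmn).mp hlt; omega
      exact ih (mid + 1) hi (by omega) (by omega) h2 h3 (by omega)
    · have hbl : lo ≤ mid ∧ mid ≤ hi := hmid (le_of_lt hlh)
      have hbh : mid < hi := hmlt.mpr (by omega)
      have hms : mid < (s.length : Int) := by omega
      have hmn : mid.toNat < s.length := by omega
      rw [PySem.List.pyGetD_eq_getElem s 0 (by omega) hms] at hlt
      have hc : (s.countP (fun v => decide (v < x)) : Int) ≤ mid := by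
        by_contra hcc
        exact hlt ((count_lt_iff s hs x mid.toNat hmn).mpr (by omega))
      exact ih lo mid h0 h1 (by omega) (by omega) (by omega)
    · omega

-- the `above` loop converges to length minus the count of elements > x
theorem brLoop_eq (s : List Int) (hs : List.Pairwise (· ≤ ·) s) (x : Int) :
    ∀ (fuel : Nat) (lo hi : Int), 0 ≤ lo →
      lo ≤ (s.length : Int) - (s.countP (fun v => decide (x < v)) : Int) →
      (s.length : Int) - (s.countP (fun v => decide (x < v)) : Int) ≤ hi →
      hi ≤ (s.length : Int) → hi - lo ≤ (fuel : Int) →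
      brLoop s x fuel lo hi
        = (s.length : Int) - (s.countP (fun v => decide (x < v)) : Int) := by
  intro fuel
  induction fuel with
  | zero => intro lo hi h0 h1 h2 h3 h4; simp only [brLoop]; omega
  | succ fuel ih =>
    intro lo hi h0 h1 h2 h3 h4
    simp only [brLoop]
    have hmid := PySem.Int.floordiv_two_mid_bounds (lo := lo) (hi := hi)
    have hmlt := PySem.Int.floordiv_lt_iff_lt_mul (a := lo + hi) (b := 2) (q := hi) (by norm_num)
    set mid := PySem.Int.floordiv (lo + hi) 2 with hm
    have hcle : s.countP (fun v => decide (x < v)) ≤ s.length := List.countP_le_length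
    split_ifs with hlh hlt
    · have hbl : lo ≤ mid ∧ mid ≤ hi := hmid (le_of_lt hlh)
      have hbh : mid < hi := hmlt.mpr (by omega)
      have hms : mid < (s.length : Int) := by omega
      have hmn : mid.toNat < s.length := by omega
      rw [PySem.List.pyGetD_eq_getElem s 0 (by omega) hms] at hlt
      have hc : (mid : Int) < (s.length : Int) - (s.countP (fun v => decide (x < v)) : Int) := by
        have := (count_le_iff s hs x mid.toNat hmn).mp hlt; omega
      exact ih (mid + 1) hi (by omega) (by omega) h2 h3 (by omega)
    · have hbl : lo ≤ mid ∧ mid ≤ hi := hmid (le_of_lt hlh)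
      have hbh : mid < hi := hmlt.mpr (by omega)
      have hms : mid < (s.length : Int) := by omega
      have hmn : mid.toNat < s.length := by omega
      rw [PySem.List.pyGetD_eq_getElem s 0 (by omega) hms] at hlt
      have hc : (s.length : Int) - (s.countP (fun v => decide (x < v)) : Int) ≤ mid := by
        by_contra hcc
        exact hlt ((count_le_iff s hs x mid.toNat hmn).mpr (by omega))
      exact ih lo mid h0 h1 (by omega) (by omega) (by omega)
    · omega

theorem catTable_getD (n k : Nat) (h : k ≤ n) :
    PySem.List.pyGetD ((List.range (n + 1)).map catI) (k : Int) 0 = catI k := by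
  rw [PySem.List.pyGetD_natCast]
  exact PySem.List.getD_map_range catI (n + 1) k 0 (by omega)

-- ===== VERDICT (by name: the statement is the Claim_ definition above) =====
theorem countBSTs_spec : Claim_equal_countBSTs := by
  unfold Claim_equal_countBSTs
  intro arr _
  unfold Spec_countBSTs countBSTs countBSTs_alt
  simp only []
  have hsl : (PySem.List.sorted arr id).length = arr.length := PySem.List.length_sorted arr id false
  have hs : (PySem.List.sorted arr id).Pairwise (· ≤ ·) := by
    simpa using PySem.List.sorted_pairwise arr id
  set s := PySem.List.sorted arr id with hsdef
  rw [tableA arr.length, tableB arr.length]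
  rw [PySem.List.foldl_append_singleton_eq_map, List.nil_append]
  refine List.map_congr_left (fun x _ => ?_)
  simp only [gt_iff_lt]
  -- A's two linear counts
  have hL : s.foldl (fun acc v => if v < x then acc + 1 else acc) (0 : Int)
      = (s.countP (fun v => decide (v < x)) : Int) := by
    have h := PySem.List.foldl_count_if (fun v => decide (v < x)) s 0
    simpa using h
  have hR : s.foldl (fun acc v => if x < v then acc + 1 else acc) (0 : Int)
      = (s.countP (fun v => decide (x < v)) : Int) := by
    have h := PySem.List.foldl_count_if (fun v => decide (x < v)) s 0
    simpa using h
  rw [hL, hR]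
  have hcL : s.countP (fun v => decide (v < x)) ≤ arr.length := by
    have := List.countP_le_length (p := fun v => decide (v < x)) (l := s); omega
  have hcR : s.countP (fun v => decide (x < v)) ≤ arr.length := by
    have := List.countP_le_length (p := fun v => decide (x < v)) (l := s); omega
  -- B's binary searches
  have hbl : blLoop s x arr.length 0 (arr.length : Int)
      = (s.countP (fun v => decide (v < x)) : Int) :=
    blLoop_eq s hs x arr.length 0 (arr.length : Int) le_rfl (by positivity)
      (by exact_mod_cast hcL) (by omega) (by omega)
  have hbr : (arr.length : Int) - brLoop s x arr.length 0 (arr.length : Int)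
      = (s.countP (fun v => decide (x < v)) : Int) := by
    have h := brLoop_eq s hs x arr.length 0 (arr.length : Int) le_rfl
      (by omega) (by omega) (by omega) (by omega)
    rw [h]; omega
  rw [hbl, hbr, catTable_getD _ _ hcL, catTable_getD _ _ hcR]
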